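-- pv_equiv track=rewrite | github.com/Nashid-Noor/shelf-sense-ai | shelfsense/ocr/text_normalizer.py | _normalize_case
-- ===== SOURCE A (Python) =====
-- def _normalize_case(text: str) -> str:
--     """
--     Normalize case for book titles.
--
--     Uses smart title casing that handles:
--     - Articles (a, an, the)
--     - Prepositions
--     - Conjunctions
--     """
--     # Words to keep lowercase (unless first/last)
--     lowercase_words = {
--         'a', 'an', 'the', 'and', 'but', 'or', 'nor', 'for', 'yet', 'so',
--         'at', 'by', 'for', 'in', 'of', 'on', 'to', 'up', 'as', 'is'
--     }
--
--     words = text.split()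
--     if not words:
--         return text
--
--     result = []
--     for i, word in enumerate(words):
--         # First and last words always capitalized
--         if i == 0 or i == len(words) - 1:
--             result.append(word.capitalize())
--         elif word.lower() in lowercase_words:
--             result.append(word.lower())
--         else:
--             result.append(word.capitalize())
--
--     return ' '.join(result)
-- ===== SOURCE B (Python) =====
-- def _normalize_case(text: str) -> str:
--     """Back-to-front decomposition: start from the last word (always
--     capitalized) and walk the remaining words right-to-left, prepending each
--     interior word under the lowercase rule; finally prepend the capitalized
--     first word.  No indices, no intermediate list, no join."""
--     lowercase_words = {
--         'a', 'an', 'the', 'and', 'but', 'or', 'nor', 'for', 'yet', 'so',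
--         'at', 'by', 'for', 'in', 'of', 'on', 'to', 'up', 'as', 'is'
--     }
--
--     words = text.split()
--     if not words:
--         return text
--
--     out = words[-1].capitalize()
--     init = words[:-1]
--     for w in reversed(init[1:]):
--         lw = w.lower()
--         out = (lw if lw in lowercase_words else w.capitalize()) + ' ' + out
--     if init:
--         out = init[0].capitalize() + ' ' + out
--     return out
-- ===== Notes on version B (the rewrite author's own statement) =====
-- stated objective: alternative
-- what changed: Replaces A's forward indexed loop that branches on i==0/i==len-1, accumulates a list and joins it with spaces, by a back-to-front build: the result string starts as the capitalized last word, the interior words are prepended right-to-left by string concatenation, and the capitalized first word is prepended at the end -- no indices, no result list, no join.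
import Mathlib
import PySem

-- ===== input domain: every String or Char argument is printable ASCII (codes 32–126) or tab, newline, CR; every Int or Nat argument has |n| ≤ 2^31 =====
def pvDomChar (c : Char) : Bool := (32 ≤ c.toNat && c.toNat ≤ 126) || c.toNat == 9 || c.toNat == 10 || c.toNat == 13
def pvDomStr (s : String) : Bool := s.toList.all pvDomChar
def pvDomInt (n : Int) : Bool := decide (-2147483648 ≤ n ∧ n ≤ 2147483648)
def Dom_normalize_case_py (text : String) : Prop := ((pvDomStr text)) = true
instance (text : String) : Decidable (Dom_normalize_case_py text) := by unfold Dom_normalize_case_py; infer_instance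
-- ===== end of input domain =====

-- B replaces A's forward indexed loop + result list + join by a back-to-front build:
-- the string starts as the capitalized last word and interior words are prepended
-- right-to-left (alternative decomposition, same pass count).

-- ===== PORT A =====
-- str.capitalize: first char title-cased, rest lowercased — exact on the ASCII domain,
-- where title-casing a char is upperChar.
def pyCapitalize (s : String) : String :=
  String.ofList (match s.toList with
    | [] => []
    | c :: rest => PySem.Chars.upperChar c :: PySem.Chars.lower rest)

-- the lowercase_words set literal (shared constant; the source lists 'for' twice, set dedups)
def lcWords : PySem.Set String :=
  PySem.Set.ofList ["a", "an", "the", "and", "but", "or", "nor", "for", "yet", "so",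
                    "at", "by", "for", "in", "of", "on", "to", "up", "as", "is"]

def normalize_case_py (text : String) : String :=
  let words := PySem.Str.split₀ text
  if words = [] then text
  else
    let result := (PySem.List.enumerate words).foldl
      (fun acc iw =>
        if iw.1 = 0 ∨ iw.1 = (words.length : Int) - 1 then acc ++ [pyCapitalize iw.2]
        else if PySem.Set.contains lcWords (PySem.Str.lower iw.2) then
          acc ++ [PySem.Str.lower iw.2]
        else acc ++ [pyCapitalize iw.2]) []
    PySem.Str.join " " result

-- ===== PORT B =====
def normalize_case_py_alt (text : String) : String :=
  let words := PySem.Str.split₀ text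
  if words = [] then text
  else
    let out0 := pyCapitalize (PySem.List.pyGetD words (-1) "")
    let init := PySem.List.slice words none (some (-1))
    let out := (PySem.List.slice init (some 1) none).reverse.foldl
      (fun acc w =>
        (let lw := PySem.Str.lower w
         if PySem.Set.contains lcWords lw then lw else pyCapitalize w) ++ " " ++ acc) out0
    if init = [] then out else pyCapitalize (PySem.List.pyGetD init 0 "") ++ " " ++ out

-- ===== PRECONDITION & SPEC =====
def Spec_normalize_case_py (text : String) (out : String) : Prop := out = normalize_case_py_alt text
instance (text : String) (out : String) : Decidable (Spec_normalize_case_py text out) := by unfold Spec_normalize_case_py; infer_instance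

-- ===== CLAIM (what is proved, stated in full; the proofs are below) =====
def Claim_equal_normalize_case_py : Prop := ∀ (text : String), Dom_normalize_case_py text → Spec_normalize_case_py text (normalize_case_py text)

-- ===== LEMMAS AND PROOFS =====

-- the interior rule as a named function (proof-side only)
def interiorWord (w : String) : String :=
  let lw := PySem.Str.lower w
  if PySem.Set.contains lcWords lw then lw else pyCapitalize w

-- A's per-element rule, as a pure function of (index, word) and the word count n
def aRule (n : Int) (iw : Int × String) : String :=
  if iw.1 = 0 ∨ iw.1 = n - 1 then pyCapitalize iw.2
  else if PySem.Set.contains lcWords (PySem.Str.lower iw.2) then PySem.Str.lower iw.2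
  else pyCapitalize iw.2

lemma enumerate_append (l₁ l₂ : List String) (s : Int) :
    PySem.List.enumerate (l₁ ++ l₂) s
      = PySem.List.enumerate l₁ s ++ PySem.List.enumerate l₂ (s + l₁.length) := by
  induction l₁ generalizing s with
  | nil => simp [PySem.List.enumerate_nil]
  | cons x xs ih =>
      simp [PySem.List.enumerate_cons, ih (s + 1)]
      ring_nf

lemma map_aRule_interior (ys : List String) (s n : Int)
    (h1 : 1 ≤ s) (h2 : s + ys.length ≤ n - 1) :
    (PySem.List.enumerate ys s).map (aRule n) = ys.map interiorWord := by
  induction ys generalizing s with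
  | nil => simp [PySem.List.enumerate_nil]
  | cons y ys ih =>
      simp only [PySem.List.enumerate_cons, List.map_cons, List.length_cons] at h2 ⊢
      have hs0 : s ≠ 0 := by omega
      have hsn : s ≠ n - 1 := by
        have : (0:Int) ≤ (ys.length : Int) := by positivity
        omega
      rw [ih (s + 1) (by omega) (by push_cast at h2 ⊢; omega)]
      simp [aRule, interiorWord, hs0, hsn]

lemma foldl_aRule (ws : List String) (n : Int) :
    (PySem.List.enumerate ws).foldl
      (fun acc iw =>
        if iw.1 = 0 ∨ iw.1 = n - 1 then acc ++ [pyCapitalize iw.2]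
        else if PySem.Set.contains lcWords (PySem.Str.lower iw.2) then
          acc ++ [PySem.Str.lower iw.2]
        else acc ++ [pyCapitalize iw.2]) []
      = (PySem.List.enumerate ws).map (aRule n) := by
  have h : ∀ (l : List (Int × String)) (init : List String),
      l.foldl
        (fun acc iw =>
          if iw.1 = 0 ∨ iw.1 = n - 1 then acc ++ [pyCapitalize iw.2]
          else if PySem.Set.contains lcWords (PySem.Str.lower iw.2) then
            acc ++ [PySem.Str.lower iw.2]
          else acc ++ [pyCapitalize iw.2]) init = init ++ l.map (aRule n) := by
    intro l
    induction l with
    | nil => simp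
    | cons p l ih =>
        intro init
        simp only [List.foldl_cons, List.map_cons, ih, aRule]
        split_ifs <;> simp
  simpa using h (PySem.List.enumerate ws) []

-- join with " " peels a head off a nonempty tail as a plain concatenation
lemma join_cons_ne (a : String) (l : List String) (h : l ≠ []) :
    PySem.Str.join " " (a :: l) = a ++ " " ++ PySem.Str.join " " l := by
  rcases l with _ | ⟨b, l⟩
  · exact absurd rfl h
  · apply String.ext
    simp [PySem.Str.join, PySem.Chars.join, List.intercalate]

lemma join_one (a : String) : PySem.Str.join " " [a] = a := by
  apply String.ext
  simp [PySem.Str.join, PySem.Chars.join, List.intercalate]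

-- the right-to-left prepend loop computes the joined map-then-capitalize-last list
lemma foldr_interior_eq (ys : List String) (z : String) :
    ys.foldr (fun w acc => interiorWord w ++ " " ++ acc) (pyCapitalize z)
      = PySem.Str.join " " (ys.map interiorWord ++ [pyCapitalize z]) := by
  induction ys with
  | nil => simp [join_one]
  | cons y ys ih =>
      rw [List.foldr_cons, ih, List.map_cons, List.cons_append,
          join_cons_ne _ _ (by simp)]

-- ===== VERDICT (by name: the statement is the Claim_ definition above) =====
theorem normalize_case_py_spec : Claim_equal_normalize_case_py := by
  intro text _
  show normalize_case_py text = normalize_case_py_alt text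
  unfold normalize_case_py normalize_case_py_alt
  generalize PySem.Str.split₀ text = ws
  rcases ws with _ | ⟨x, rest⟩
  · simp
  · rcases List.eq_nil_or_concat rest with h | ⟨ys, z, h⟩
    · subst h
      rw [if_neg (by simp), if_neg (by simp)]
      have hget : PySem.List.pyGetD [x] (-1) "" = x := by
        simp [PySem.List.pyGetD, PySem.List.pyGet?, PySem.List.pyIdx?]
      have hinit : PySem.List.slice [x] none (some (-1)) = ([] : List String) := by
        simp [PySem.List.slice]
      rw [hget, hinit, if_pos rfl]
      show PySem.Str.join " " _ = _
      rw [foldl_aRule [x] (([x].length : Int))]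
      have : (PySem.List.enumerate [x]).map (aRule (([x].length : Int))) = [pyCapitalize x] := by
        simp [PySem.List.enumerate_cons, PySem.List.enumerate_nil, aRule]
      rw [this, join_one]
      simp [PySem.List.slice]
    · subst h
      simp only [List.concat_eq_append]
      rw [if_neg (by simp), if_neg (by simp)]
      have hlen : ((x :: (ys ++ [z])).length : Int) = (ys.length : Int) + 2 := by
        simp [List.length_append]; ring
      rw [hlen, foldl_aRule (x :: (ys ++ [z])) ((ys.length : Int) + 2)]
      rw [PySem.List.enumerate_cons, enumerate_append ys [z] (0 + 1)]
      rw [List.map_cons, List.map_append,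
          map_aRule_interior ys (0 + 1) ((ys.length : Int) + 2) (by omega) (by omega)]
      have hlast : (PySem.List.enumerate [z] (0 + 1 + ys.length)).map
          (aRule ((ys.length : Int) + 2)) = [pyCapitalize z] := by
        simp only [PySem.List.enumerate_cons, PySem.List.enumerate_nil,
                   List.map_cons, List.map_nil, aRule]
        rw [if_pos (Or.inr (by push_cast; ring))]
      rw [hlast]
      have hzrule : aRule ((ys.length : Int) + 2) (0, x) = pyCapitalize x := by
        simp [aRule]
      rw [hzrule]
      rw [join_cons_ne (pyCapitalize x) (ys.map interiorWord ++ [pyCapitalize z]) (by simp)]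
      have hgetz : PySem.List.pyGetD (x :: (ys ++ [z])) (-1) "" = z := by
        rw [show x :: (ys ++ [z]) = (x :: ys) ++ [z] by simp]
        exact PySem.List.pyGetD_neg_one_append_singleton _ _ _
      have hinit : PySem.List.slice (x :: (ys ++ [z])) none (some (-1)) = x :: ys := by
        simp only [PySem.List.slice, PySem.List.clampIdx, List.length_cons, List.length_append,
                   List.length_nil]
        norm_num
        rw [if_neg (by omega)]
        rw [show x :: (ys ++ [z]) = (x :: ys) ++ [z] by simp,
            List.take_append_of_le_length (by simp)]
        exact List.take_of_length_le (by simp)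
      rw [hgetz, hinit, if_neg (by simp)]
      have htail : PySem.List.slice (x :: ys) (some 1) none = ys := by
        simp [PySem.List.slice]
      have hget0 : PySem.List.pyGetD (x :: ys) 0 "" = x := by
        simp [PySem.List.pyGetD, PySem.List.pyGet?, PySem.List.pyIdx?]
      rw [htail, hget0, List.foldl_reverse]
      show _ = pyCapitalize x ++ " " ++ ys.foldr (fun w acc => interiorWord w ++ " " ++ acc) (pyCapitalize z)
      rw [foldr_interior_eq]
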